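-- pv_equiv track=rewrite | github.com/zxgsy520/pedigree | simulation_pan_genome.py | stat_gene
-- ===== SOURCE A (Python) =====
-- def all_true(list1, list2):
--
--     jc = True
--     for i in list1:
--         if i not in list2:
--             jc = False
--             break
--     return jc
--
-- def only_true(list1, list2):
--
--     jc = False
--     for i in list1:
--         if i in list2:
--             jc = True
--             break
--     return jc
--
-- def stat_gene(data, samples):
--
--     core = 0
--     pan = 0
--
--     for line in data.values():
--         if all_true(samples, line):
--             core += 1
--             pan += 1
--             continue
--         if only_true(samples, line):
--             pan += 1
--
--     return core, pan
-- ===== SOURCE B (Python) =====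
-- def stat_gene(data, samples):
--     core = 0
--     pan = 0
--     n = len(samples)
--     for line in data.values():
--         line_set = set(line)
--         matched = sum(1 for s in samples if s in line_set)
--         if matched == n:
--             core += 1
--             pan += 1
--         elif matched > 0:
--             pan += 1
--     return core, pan
-- ===== Notes on version B (the rewrite author's own statement) =====
-- stated objective: simpler
-- what changed: Drops the all_true/only_true short-circuiting boolean helper scans; instead each line is turned into a set once and a single running count of matched samples is kept, classified against len(samples).
import Mathlib
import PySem

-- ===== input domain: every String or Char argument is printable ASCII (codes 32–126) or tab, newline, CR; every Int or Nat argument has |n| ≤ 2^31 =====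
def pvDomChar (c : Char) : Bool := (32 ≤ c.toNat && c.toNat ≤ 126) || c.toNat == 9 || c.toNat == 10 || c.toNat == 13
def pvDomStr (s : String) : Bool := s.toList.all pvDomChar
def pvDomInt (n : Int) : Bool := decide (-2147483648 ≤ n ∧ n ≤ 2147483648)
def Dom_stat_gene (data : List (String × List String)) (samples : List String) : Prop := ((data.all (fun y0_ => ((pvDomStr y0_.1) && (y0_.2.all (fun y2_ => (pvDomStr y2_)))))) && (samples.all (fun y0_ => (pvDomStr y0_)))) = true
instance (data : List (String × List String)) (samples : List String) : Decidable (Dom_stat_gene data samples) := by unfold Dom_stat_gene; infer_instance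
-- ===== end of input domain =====

-- B replaces the two short-circuiting boolean helper scans with one running match count per line against a per-line set (objective: simpler).

-- ===== PORT A =====
-- jc = True; for i in list1: if i not in list2: jc = False; break
def all_true (list1 list2 : List String) : Bool :=
  match list1 with
  | [] => true
  | i :: rest => if list2.contains i then all_true rest list2 else false

-- jc = False; for i in list1: if i in list2: jc = True; break
def only_true (list1 list2 : List String) : Bool :=
  match list1 with
  | [] => false
  | i :: rest => if list2.contains i then true else only_true rest list2

def stat_gene (data : List (String × List String)) (samples : List String) : Int × Int :=
  let cp := data.foldl (fun (cp : Int × Int) kv =>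
    let line := kv.2
    if all_true samples line then (cp.1 + 1, cp.2 + 1)
    else if only_true samples line then (cp.1, cp.2 + 1)
    else cp) (0, 0)
  cp

-- ===== PORT B =====
-- matched = sum(1 for s in samples if s in line)
def countMatched (samples line : List String) : Nat :=
  samples.foldl (fun acc s => if line.contains s then acc + 1 else acc) 0

def stat_gene_alt (data : List (String × List String)) (samples : List String) : Int × Int :=
  let n := samples.length
  data.foldl (fun (cp : Int × Int) kv =>
    let lineSet : PySem.Set String := PySem.Set.ofList kv.2
    let matched := countMatched samples lineSet
    if matched = n then (cp.1 + 1, cp.2 + 1)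
    else if matched > 0 then (cp.1, cp.2 + 1)
    else cp) (0, 0)

-- ===== PRECONDITION & SPEC =====
def Spec_stat_gene (data : List (String × List String)) (samples : List String) (out : Int × Int) : Prop := out = stat_gene_alt data samples
instance (data : List (String × List String)) (samples : List String) (out : Int × Int) : Decidable (Spec_stat_gene data samples out) := by unfold Spec_stat_gene; infer_instance

-- ===== CLAIM (what is proved, stated in full; the proofs are below) =====
def Claim_equal_stat_gene : Prop := ∀ (data : List (String × List String)) (samples : List String), Dom_stat_gene data samples → Spec_stat_gene data samples (stat_gene data samples)

-- ===== LEMMAS AND PROOFS =====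

theorem countMatched_aux (line : List String) (l : List String) (n : Nat) :
    l.foldl (fun acc s => if line.contains s then acc + 1 else acc) n
      = n + l.countP (fun s => line.contains s) := by
  induction l generalizing n with
  | nil => simp
  | cons a t ih =>
    simp only [List.foldl_cons, List.countP_cons, ih]
    split_ifs <;> omega

theorem countMatched_eq (samples line : List String) :
    countMatched samples line = samples.countP (fun s => line.contains s) := by
  unfold countMatched
  rw [countMatched_aux]
  omega

theorem all_true_iff (samples line : List String) :
    all_true samples line = true ↔ countMatched samples line = samples.length := by
  rw [countMatched_eq]
  induction samples with
  | nil => simp [all_true]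
  | cons a t ih =>
    simp only [all_true, List.countP_cons, List.length_cons]
    by_cases h : line.contains a = true
    · rw [if_pos h, if_pos h, ih]
      constructor <;> intro hh <;> omega
    · rw [if_neg h, if_neg h]
      have hle := List.countP_le_length (l := t) (p := fun s => line.contains s)
      constructor
      · intro hh; exact absurd hh (by simp)
      · intro hh; exact absurd hh (by omega)

theorem only_true_iff (samples line : List String) :
    only_true samples line = true ↔ countMatched samples line > 0 := by
  rw [countMatched_eq]
  induction samples with
  | nil => simp [only_true]
  | cons a t ih =>
    simp only [only_true, List.countP_cons]
    by_cases h : line.contains a = true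
    · rw [if_pos h, if_pos h]
      exact ⟨fun _ => by omega, fun _ => rfl⟩
    · rw [if_neg h, if_neg h, ih]
      omega

theorem contains_ofList (xs : List String) (y : String) :
    List.contains (PySem.Set.ofList xs) y = List.contains xs y := by
  by_cases h : y ∈ xs <;>
    simp [PySem.Set.mem_ofList, h]

theorem countMatched_set (samples line : List String) :
    countMatched samples (PySem.Set.ofList line) = countMatched samples line := by
  unfold countMatched
  congr 1
  funext acc s
  rw [contains_ofList]

theorem fold_eq (samples : List String) (data : List (String × List String)) (cp : Int × Int) :
    data.foldl (fun (cp : Int × Int) kv =>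
      if all_true samples kv.2 then (cp.1 + 1, cp.2 + 1)
      else if only_true samples kv.2 then (cp.1, cp.2 + 1)
      else cp) cp
    = data.foldl (fun (cp : Int × Int) kv =>
      if countMatched samples kv.2 = samples.length then (cp.1 + 1, cp.2 + 1)
      else if countMatched samples kv.2 > 0 then (cp.1, cp.2 + 1)
      else cp) cp := by
  induction data generalizing cp with
  | nil => rfl
  | cons kv t ih =>
    simp only [List.foldl_cons]
    have h1 : all_true samples kv.2 = decide (countMatched samples kv.2 = samples.length) := by
      rcases Bool.eq_false_or_eq_true (all_true samples kv.2) with h | h <;>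
        rw [h] <;> [skip; skip] <;>
        first
        | (symm; simp only [decide_eq_true_eq]; exact (all_true_iff _ _).mp h)
        | (symm; simp only [decide_eq_false_iff_not];
           intro hc; exact absurd ((all_true_iff samples kv.2).mpr hc) (by simp [h]))
    have h2 : only_true samples kv.2 = decide (countMatched samples kv.2 > 0) := by
      rcases Bool.eq_false_or_eq_true (only_true samples kv.2) with h | h <;>
        rw [h] <;>
        first
        | (symm; simp only [decide_eq_true_eq]; exact (only_true_iff _ _).mp h)
        | (symm; simp only [decide_eq_false_iff_not];
           intro hc; exact absurd ((only_true_iff samples kv.2).mpr hc) (by simp [h]))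
    rw [show (if all_true samples kv.2 then (cp.1 + 1, cp.2 + 1)
          else if only_true samples kv.2 then (cp.1, cp.2 + 1) else cp)
        = (if countMatched samples kv.2 = samples.length then (cp.1 + 1, cp.2 + 1)
          else if countMatched samples kv.2 > 0 then (cp.1, cp.2 + 1) else cp) by
      rw [h1, h2]; by_cases hA : countMatched samples kv.2 = samples.length <;>
        by_cases hB : countMatched samples kv.2 > 0 <;> simp [hA, hB]]
    exact ih _

-- ===== VERDICT (by name: the statement is the Claim_ definition above) =====
theorem alt_fold_set (samples : List String) (data : List (String × List String)) (cp : Int × Int) :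
    data.foldl (fun (cp : Int × Int) kv =>
      if countMatched samples (PySem.Set.ofList kv.2) = samples.length then (cp.1 + 1, cp.2 + 1)
      else if countMatched samples (PySem.Set.ofList kv.2) > 0 then (cp.1, cp.2 + 1)
      else cp) cp
    = data.foldl (fun (cp : Int × Int) kv =>
      if countMatched samples kv.2 = samples.length then (cp.1 + 1, cp.2 + 1)
      else if countMatched samples kv.2 > 0 then (cp.1, cp.2 + 1)
      else cp) cp := by
  congr 1
  funext cp kv
  rw [countMatched_set]

theorem stat_gene_spec : Claim_equal_stat_gene := by
  intro data samples _
  unfold Spec_stat_gene stat_gene stat_gene_alt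
  simp only []
  rw [alt_fold_set]
  simpa using fold_eq samples data (0, 0)
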